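-- pv_equiv track=rewrite | github.com/Ptr-31/python_basics | task(not)12 - password.py | repeated_items
-- ===== SOURCE A (Python) =====
-- def repeated_items(password:str) -> bool:
--     temp_bool = False
--     for i in range(0, len(password) - 2):
--         if(ord(password[i]) == ord(password[i+1]) - 1 == ord(password[i+2]) - 2):
--             temp_bool = True
--         elif((ord(password[i]) == ord(password[i+1]) == ord(password[i+2]))):
--             temp_bool = True
--     return temp_bool
-- ===== SOURCE B (Python) =====
-- def repeated_items(password: str) -> bool:
--     # generate, for each distinct character c, the two 3-char patterns
--     # (c repeated and the c,c+1,c+2 staircase) and test substring containment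
--     for c in set(password):
--         if c * 3 in password or (c + chr(ord(c) + 1) + chr(ord(c) + 2)) in password:
--             return True
--     return False
-- ===== Notes on version B (the rewrite author's own statement) =====
-- stated objective: alternative
-- what changed: B iterates over the distinct characters of the password, builds for each the two literal 3-char patterns (c repeated three times and the staircase c,c+1,c+2), and returns whether either occurs as a substring, instead of A's positional loop testing chained ord comparisons at every index triplet.
import Mathlib
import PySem

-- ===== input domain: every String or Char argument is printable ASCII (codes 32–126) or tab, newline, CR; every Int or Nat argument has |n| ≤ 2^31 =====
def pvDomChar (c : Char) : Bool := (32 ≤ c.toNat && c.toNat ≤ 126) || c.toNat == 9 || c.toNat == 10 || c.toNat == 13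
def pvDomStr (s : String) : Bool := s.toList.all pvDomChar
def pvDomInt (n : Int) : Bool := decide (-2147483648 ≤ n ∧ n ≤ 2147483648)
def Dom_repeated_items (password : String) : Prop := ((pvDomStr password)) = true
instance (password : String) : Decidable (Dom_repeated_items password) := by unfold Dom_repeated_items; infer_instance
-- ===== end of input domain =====

-- B replaces A's positional scan over index triplets by pattern generation: for each distinct
-- character c it tests whether the literal pattern "ccc" or "c,c+1,c+2" occurs as a substring.

-- ===== PORT A =====
def repeated_items (password : String) : Bool :=
  let l := password.toList
  (PySem.List.pyRange 0 ((l.length : Int) - 2) 1).foldl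
    (fun temp_bool i =>
      let x := ((PySem.List.pyGetD l i ' ').toNat : Int)
      let y := ((PySem.List.pyGetD l (i + 1) ' ').toNat : Int)
      let z := ((PySem.List.pyGetD l (i + 2) ' ').toNat : Int)
      if x == y - 1 && y - 1 == z - 2 then true
      else if x == y && y == z then true
      else temp_bool)
    false

-- ===== PORT B =====
-- chr(ord(c)+k) is ported as Char.ofNat (c.toNat + k): exact on the ASCII domain (valid codepoints)
def repeated_items_alt (password : String) : Bool :=
  let l := password.toList
  (PySem.Set.ofList l).any (fun c =>
    PySem.Chars.isIn [c, c, c] l ||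
    PySem.Chars.isIn [c, Char.ofNat (c.toNat + 1), Char.ofNat (c.toNat + 2)] l)

-- ===== PRECONDITION & SPEC =====
def Spec_repeated_items (password : String) (out : Bool) : Prop := out = repeated_items_alt password
instance (password : String) (out : Bool) : Decidable (Spec_repeated_items password out) := by unfold Spec_repeated_items; infer_instance

-- ===== CLAIM (what is proved, stated in full; the proofs are below) =====
def Claim_equal_repeated_items : Prop := ∀ (password : String), Dom_repeated_items password → Spec_repeated_items password (repeated_items password)

-- ===== LEMMAS AND PROOFS =====

/-- A's per-index test, at an integer index. -/
def pvPAI (l : List Char) (i : Int) : Bool :=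
  ((((PySem.List.pyGetD l i ' ').toNat : Int) == ((PySem.List.pyGetD l (i + 1) ' ').toNat : Int) - 1) &&
   (((PySem.List.pyGetD l (i + 1) ' ').toNat : Int) - 1 == ((PySem.List.pyGetD l (i + 2) ' ').toNat : Int) - 2)) ||
  ((((PySem.List.pyGetD l i ' ').toNat : Int) == ((PySem.List.pyGetD l (i + 1) ' ').toNat : Int)) &&
   (((PySem.List.pyGetD l (i + 1) ' ').toNat : Int) == ((PySem.List.pyGetD l (i + 2) ' ').toNat : Int)))

/-- A's per-index test, at a natural index. -/
def pvPA (l : List Char) (k : Nat) : Bool :=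
  let x := ((l.getD k ' ').toNat : Int)
  let y := ((l.getD (k + 1) ' ').toNat : Int)
  let z := ((l.getD (k + 2) ' ').toNat : Int)
  (x == y - 1 && y - 1 == z - 2) || (x == y && y == z)

/-- the triplet condition both programs test -/
def pvGood (a b c : Char) : Bool :=
  (((a.toNat : Int) == (b.toNat : Int) - 1) && ((b.toNat : Int) - 1 == (c.toNat : Int) - 2)) ||
  (((a.toNat : Int) == (b.toNat : Int)) && ((b.toNat : Int) == (c.toNat : Int)))

/-- common recursive characterisation -/
def pvChk (l : List Char) : Bool :=
  match l with
  | a :: b :: c :: t => pvGood a b c || pvChk (b :: c :: t)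
  | _ => false

theorem pv_foldA (l : List Char) (xs : List Int) (init : Bool) :
    xs.foldl
      (fun temp_bool i =>
        let x := ((PySem.List.pyGetD l i ' ').toNat : Int)
        let y := ((PySem.List.pyGetD l (i + 1) ' ').toNat : Int)
        let z := ((PySem.List.pyGetD l (i + 2) ' ').toNat : Int)
        if x == y - 1 && y - 1 == z - 2 then true
        else if x == y && y == z then true
        else temp_bool)
      init
      = (init || xs.any (pvPAI l)) := by
  induction xs generalizing init with
  | nil => simp
  | cons h t ih =>
      simp only [List.foldl_cons, List.any_cons, ih, pvPAI]
      by_cases hp : (((PySem.List.pyGetD l h ' ').toNat : Int) == ((PySem.List.pyGetD l (h + 1) ' ').toNat : Int) - 1 &&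
          ((PySem.List.pyGetD l (h + 1) ' ').toNat : Int) - 1 == ((PySem.List.pyGetD l (h + 2) ' ').toNat : Int) - 2) = true <;>
        by_cases hq : (((PySem.List.pyGetD l h ' ').toNat : Int) == ((PySem.List.pyGetD l (h + 1) ' ').toNat : Int) &&
          ((PySem.List.pyGetD l (h + 1) ' ').toNat : Int) == ((PySem.List.pyGetD l (h + 2) ' ').toNat : Int)) = true <;>
        simp [hp, hq]

theorem pv_PAI_natCast (l : List Char) (k : Nat) : pvPAI l ((0 : Int) + (k : Int)) = pvPA l k := by
  have h2 : ((k : Int) + 1) = ((k + 1 : Nat) : Int) := by push_cast; ring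
  have h3 : ((k : Int) + 2) = ((k + 2 : Nat) : Int) := by push_cast; ring
  simp only [pvPAI, pvPA, zero_add, h2, h3, PySem.List.pyGetD_natCast]

theorem pv_range_any (l : List Char) :
    (PySem.List.pyRange 0 ((l.length : Int) - 2) 1).any (pvPAI l) = (List.range (l.length - 2)).any (pvPA l) := by
  rw [PySem.List.pyRange_one]
  have htn : (((l.length : Int) - 2) - 0).toNat = l.length - 2 := by omega
  rw [htn, List.any_map]
  have : (pvPAI l ∘ fun k : Nat => (0 : Int) + (k : Int)) = pvPA l := funext (pv_PAI_natCast l)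
  rw [this]

theorem pv_A_eq_chk (l : List Char) :
    (List.range (l.length - 2)).any (pvPA l) = pvChk l := by
  match l with
  | [] => simp [pvChk]
  | [a] => simp [pvChk]
  | [a, b] => simp [pvChk]
  | a :: b :: c :: t =>
      have ih := pv_A_eq_chk (b :: c :: t)
      have hlen : (a :: b :: c :: t).length - 2 = ((b :: c :: t).length - 2) + 1 := by simp
      rw [hlen, List.range_succ_eq_map]
      simp only [List.any_cons, List.any_map]
      have hshift : (pvPA (a :: b :: c :: t) ∘ fun k => k + 1) = pvPA (b :: c :: t) := by
        funext k; simp [pvPA]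
      rw [hshift, ih]
      simp [pvPA, pvChk, pvGood]
termination_by l.length

theorem pv_toNat_inj (a b : Char) (h : a.toNat = b.toNat) : a = b := by
  apply Char.ext
  exact UInt32.toNat_inj.mp h

theorem pv_ofNat_toNat (n : Nat) (h : n < 55296) : (Char.ofNat n).toNat = n := by
  unfold Char.ofNat Char.toNat
  rw [dif_pos (Or.inl h)]
  simp [Char.ofNatAux]

/-- pvChk holds iff some good triplet is an infix. -/
theorem pv_chk_iff (l : List Char) :
    pvChk l = true ↔ ∃ a b c, [a, b, c] <:+: l ∧ pvGood a b c = true := by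
  match l with
  | [] =>
      constructor
      · intro h; exact absurd h (by simp [pvChk])
      · rintro ⟨a, b, c, ⟨s, t, h⟩, _⟩; simp at h
  | [x] =>
      constructor
      · intro h; exact absurd h (by simp [pvChk])
      · rintro ⟨a, b, c, ⟨s, t, h⟩, _⟩
        have : ([x] : List Char).length = (s ++ [a,b,c] ++ t).length := by rw [h]
        simp at this; omega
  | [x, y] =>
      constructor
      · intro h; exact absurd h (by simp [pvChk])
      · rintro ⟨a, b, c, ⟨s, t, h⟩, _⟩
        have : ([x, y] : List Char).length = (s ++ [a,b,c] ++ t).length := by rw [h]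
        simp at this; omega
  | x :: y :: z :: t =>
      have ih := pv_chk_iff (y :: z :: t)
      constructor
      · intro h
        rcases Bool.or_eq_true_iff.mp (by simpa [pvChk] using h) with hg | hr
        · exact ⟨x, y, z, ⟨[], t, rfl⟩, hg⟩
        · obtain ⟨a, b, c, ⟨s, u, hs⟩, hg⟩ := ih.mp hr
          exact ⟨a, b, c, ⟨x :: s, u, by simp [hs]⟩, hg⟩
      · rintro ⟨a, b, c, ⟨s, u, hs⟩, hg⟩
        match s, hs with
        | [], hs =>
            simp at hs
            obtain ⟨rfl, rfl, rfl, rfl⟩ := hs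
            simp [pvChk, hg]
        | w :: s, hs =>
            simp only [List.cons_append, List.cons.injEq] at hs
            have : pvChk (y :: z :: t) = true :=
              ih.mpr ⟨a, b, c, ⟨s, u, hs.2⟩, hg⟩
            simp [pvChk, this]
termination_by l.length

/-- every char of l is < 55296 under Dom -/
theorem pv_dom_lt (l : List Char) (hd : l.all pvDomChar = true) (c : Char) (hc : c ∈ l) :
    c.toNat < 55294 := by
  have := List.all_eq_true.mp hd c hc
  simp [pvDomChar] at this
  omega

theorem pv_B_eq_chk (l : List Char) (hd : l.all pvDomChar = true) :
    (PySem.Set.ofList l).any (fun c =>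
      PySem.Chars.isIn [c, c, c] l ||
      PySem.Chars.isIn [c, Char.ofNat (c.toNat + 1), Char.ofNat (c.toNat + 2)] l) = pvChk l := by
  apply Bool.eq_iff_iff.mpr
  rw [pv_chk_iff]
  constructor
  · intro h
    obtain ⟨c, hcmem, hc⟩ := List.any_eq_true.mp h
    have hcl : c ∈ l := (PySem.Set.mem_ofList l c).mp hcmem
    have hlt : c.toNat < 55294 := pv_dom_lt l hd c hcl
    rcases Bool.or_eq_true_iff.mp hc with hin | hin
    · obtain hinf := (PySem.Chars.isIn_iff_infix _ _).mp hin
      refine ⟨c, c, c, hinf, ?_⟩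
      simp [pvGood]
    · obtain hinf := (PySem.Chars.isIn_iff_infix _ _).mp hin
      refine ⟨c, Char.ofNat (c.toNat + 1), Char.ofNat (c.toNat + 2), hinf, ?_⟩
      have h1 : (Char.ofNat (c.toNat + 1)).toNat = c.toNat + 1 := pv_ofNat_toNat _ (by omega)
      have h2 : (Char.ofNat (c.toNat + 2)).toNat = c.toNat + 2 := pv_ofNat_toNat _ (by omega)
      simp only [pvGood, h1, h2]
      apply Bool.or_eq_true_iff.mpr; left
      simp only [Bool.and_eq_true, beq_iff_eq]
      push_cast; omega
  · rintro ⟨a, b, c, hinf, hg⟩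
    have hal : a ∈ l := hinf.subset (by simp)
    have hbl : b ∈ l := hinf.subset (by simp)
    have hcl : c ∈ l := hinf.subset (by simp)
    have hla := pv_dom_lt l hd a hal
    refine List.any_eq_true.mpr ⟨a, (PySem.Set.mem_ofList l a).mpr hal, ?_⟩
    rcases Bool.or_eq_true_iff.mp hg with hg | hg
    · -- staircase: b = chr(a+1), c = chr(a+2)
      simp only [Bool.and_eq_true, beq_iff_eq] at hg
      have hb : b.toNat = a.toNat + 1 := by omega
      have hcn : c.toNat = a.toNat + 2 := by omega
      apply Bool.or_eq_true_iff.mpr; right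
      apply (PySem.Chars.isIn_iff_infix _ _).mpr
      have e1 : Char.ofNat (a.toNat + 1) = b := pv_toNat_inj _ _ (by rw [pv_ofNat_toNat _ (by omega), hb])
      have e2 : Char.ofNat (a.toNat + 2) = c := pv_toNat_inj _ _ (by rw [pv_ofNat_toNat _ (by omega), hcn])
      rw [e1, e2]; exact hinf
    · -- equal: a = b = c
      simp only [Bool.and_eq_true, beq_iff_eq] at hg
      have hb : b = a := pv_toNat_inj _ _ (by omega)
      have hcn : c = a := pv_toNat_inj _ _ (by omega)
      apply Bool.or_eq_true_iff.mpr; left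
      apply (PySem.Chars.isIn_iff_infix _ _).mpr
      rw [hb, hcn] at hinf
      exact hinf

-- ===== VERDICT (by name: the statement is the Claim_ definition above) =====
theorem repeated_items_spec : Claim_equal_repeated_items := by
  intro password hdom
  show repeated_items password = repeated_items_alt password
  have hd : password.toList.all pvDomChar = true := hdom
  simp only [repeated_items, repeated_items_alt]
  rw [pv_foldA, Bool.false_or, pv_range_any, pv_A_eq_chk, pv_B_eq_chk _ hd]
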